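-- pv_equiv track=rewrite | github.com/bhavy67/ai-ml-python | Bootcamp/Module_9_Assignment/encrypting_dna_codes.py | encrypt_bases
-- ===== SOURCE A (Python) =====
-- def encrypt_bases(input_bases):
--     standard = ['A', 'C', 'G', 'T']
--     non_standard = ['H', 'I', 'M', 'O', 'P', 'Q']
--
--     # Build pair mapping (a–p)
--     pair_map = {}
--     letter = ord('a')
--     for b1 in standard:
--         for b2 in standard:
--             pair_map[b1 + b2] = chr(letter)
--             letter += 1
--
--     # Single standard base mapping (q–t)
--     single_map = {'A': 'q', 'C': 'r', 'G': 's', 'T': 't'}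
--
--     # Non-standard mapping (u–z)
--     non_standard_map = {
--         base: chr(ord('u') + i)
--         for i, base in enumerate(non_standard)
--     }
--
--     result = []
--     i = 0
--     n = len(input_bases)
--
--     while i < n:
--         if (
--             i + 1 < n and
--             input_bases[i] in standard and
--             input_bases[i + 1] in standard
--         ):
--             result.append(pair_map[input_bases[i:i+2]])
--             i += 2
--         else:
--             base = input_bases[i]
--             if base in single_map:
--                 result.append(single_map[base])
--             else:
--                 result.append(non_standard_map[base])
--             i += 1
--
--     return ''.join(result)
-- ===== SOURCE B (Python) =====
-- def encrypt_bases(input_bases):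
--     STD = 'ACGT'
--     NONSTD = 'HIMOPQ'
--     out = []
--     pending = None  # a standard base seen, still awaiting a partner
--     for c in input_bases:
--         if c in STD:
--             if pending is None:
--                 pending = c
--             else:
--                 out.append(chr(ord('a') + 4 * STD.index(pending) + STD.index(c)))
--                 pending = None
--         else:
--             if pending is not None:
--                 out.append(chr(ord('q') + STD.index(pending)))
--                 pending = None
--             out.append(chr(ord('u') + NONSTD.index(c)))
--     if pending is not None:
--         out.append(chr(ord('q') + STD.index(pending)))
--     return ''.join(out)
-- ===== Notes on version B (the rewrite author's own statement) =====
-- stated objective: alternative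
-- what changed: Replaces the index-advancing while loop with lookahead and the three lookup dicts built per call by a single for-each pass that keeps one pending standard base as state and computes each output character by closed-form arithmetic on the index of the base in the standard / non-standard alphabet; Pre_ excludes inputs containing a character outside the two alphabets, where A raises KeyError and B raises ValueError.
import Mathlib
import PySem

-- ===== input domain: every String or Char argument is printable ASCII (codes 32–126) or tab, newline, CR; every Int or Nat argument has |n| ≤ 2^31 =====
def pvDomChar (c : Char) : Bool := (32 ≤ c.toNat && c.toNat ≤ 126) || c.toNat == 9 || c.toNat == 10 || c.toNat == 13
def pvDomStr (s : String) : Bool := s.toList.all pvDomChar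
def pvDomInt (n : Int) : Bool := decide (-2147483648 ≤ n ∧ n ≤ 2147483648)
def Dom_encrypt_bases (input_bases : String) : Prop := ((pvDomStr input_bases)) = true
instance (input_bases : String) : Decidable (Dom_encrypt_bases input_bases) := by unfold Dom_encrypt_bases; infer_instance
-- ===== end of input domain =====

-- B replaces A's index-advancing while loop + three lookup dicts by a single for-each pass with a
-- "pending base" state and closed-form arithmetic character codes (objective: alternative).


-- ===== PORT A =====
def aStandard : List Char := ['A', 'C', 'G', 'T']
def aNonStandard : List Char := ['H', 'I', 'M', 'O', 'P', 'Q']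

-- pair_map: nested loop over standard × standard, counter starting at ord('a') = 97
def aPairMap : PySem.Dict (List Char) Char :=
  (aStandard.foldl
    (fun st b1 => aStandard.foldl
      (fun st b2 => (st.1.insert [b1, b2] (Char.ofNat st.2), st.2 + 1)) st)
    (PySem.Dict.empty, 97)).1

def aSingleMap : PySem.Dict Char Char :=
  PySem.Dict.ofList [('A', 'q'), ('C', 'r'), ('G', 's'), ('T', 't')]

-- dict comprehension over enumerate(non_standard)
def aNonStandardMap : PySem.Dict Char Char :=
  (PySem.List.enumerate aNonStandard 0).foldl
    (fun d p => d.insert p.2 (Char.ofNat (117 + p.1.toNat))) PySem.Dict.empty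

-- the while loop; getD ' ' marks the KeyError cases, which Pre_ excludes
def aLoop (cs : List Char) (i : Nat) (acc : List Char) : List Char :=
  if _h : i < cs.length then
    if i + 1 < cs.length ∧ cs[i]! ∈ aStandard ∧ cs[i+1]! ∈ aStandard then
      aLoop cs (i + 2)
        (acc ++ [aPairMap.getD (PySem.List.slice cs (some (i : Int)) (some ((i : Int) + 2))) ' '])
    else
      let base := cs[i]!
      if aSingleMap.contains base then
        aLoop cs (i + 1) (acc ++ [aSingleMap.getD base ' '])
      else
        aLoop cs (i + 1) (acc ++ [aNonStandardMap.getD base ' '])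
  else acc
termination_by cs.length - i
decreasing_by all_goals omega

def encrypt_bases (input_bases : String) : String :=
  String.mk (aLoop input_bases.toList 0 [])

-- ===== PORT B =====
-- closed-form codes: 'ACGT'.index / 'HIMOPQ'.index (getD 0 marks the ValueError case, excluded by Pre_)
def bStdIdx (c : Char) : Nat := (PySem.List.index? ['A', 'C', 'G', 'T'] c).getD 0
def bNonIdx (c : Char) : Nat := (PySem.List.index? ['H', 'I', 'M', 'O', 'P', 'Q'] c).getD 0

def bPair (p c : Char) : Char := Char.ofNat (97 + 4 * bStdIdx p + bStdIdx c)
def bSingle (p : Char) : Char := Char.ofNat (113 + bStdIdx p)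
def bNon (c : Char) : Char := Char.ofNat (117 + bNonIdx c)

-- one step of the for-each pass: state = (out, pending)
def bStep (st : List Char × Option Char) (c : Char) : List Char × Option Char :=
  if c ∈ (['A', 'C', 'G', 'T'] : List Char) then
    match st.2 with
    | none => (st.1, some c)
    | some p => (st.1 ++ [bPair p c], none)
  else
    match st.2 with
    | some p => (st.1 ++ [bSingle p, bNon c], none)
    | none => (st.1 ++ [bNon c], none)

def encrypt_bases_alt (input_bases : String) : String :=
  let r := input_bases.toList.foldl bStep ([], none)
  String.mk (match r.2 with
    | some p => r.1 ++ [bSingle p]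
    | none => r.1)

-- ===== PRECONDITION & SPEC =====
-- Pre_ excludes exactly the inputs containing a character outside 'ACGTHIMOPQ': there A raises KeyError
-- (and B raises ValueError), so A returns no value.
def Pre_encrypt_bases (input_bases : String) : Prop :=
  input_bases.toList.all
    (fun c => c ∈ (['A', 'C', 'G', 'T', 'H', 'I', 'M', 'O', 'P', 'Q'] : List Char)) = true
instance (input_bases : String) : Decidable (Pre_encrypt_bases input_bases) := by
  unfold Pre_encrypt_bases; infer_instance

def pvWitness_encrypt_bases : String := "ACGTQA"

def Spec_encrypt_bases (input_bases : String) (out : String) : Prop := out = encrypt_bases_alt input_bases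
instance (input_bases : String) (out : String) : Decidable (Spec_encrypt_bases input_bases out) := by unfold Spec_encrypt_bases; infer_instance

-- ===== CLAIM (what is proved, stated in full; the proofs are below) =====
def Claim_equal_encrypt_bases : Prop := ∀ (input_bases : String), Dom_encrypt_bases input_bases → Pre_encrypt_bases input_bases → Spec_encrypt_bases input_bases (encrypt_bases input_bases)

-- ===== LEMMAS AND PROOFS =====

-- A's decisions as structural recursion on the remaining characters
def aSingleOut (c : Char) : Char :=
  if aSingleMap.contains c then aSingleMap.getD c ' ' else aNonStandardMap.getD c ' '

def specA : List Char → List Char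
  | [] => []
  | [a] => [aSingleOut a]
  | a :: b :: rest =>
    if a ∈ aStandard ∧ b ∈ aStandard then aPairMap.getD [a, b] ' ' :: specA rest
    else aSingleOut a :: specA (b :: rest)

theorem slice_two (cs : List Char) (i : Nat) :
    PySem.List.slice cs (some (i : Int)) (some ((i : Int) + 2)) = (cs.drop i).take 2 := by
  have h2 : ((i : Int) + 2) = ((i : Int) + ((2 : Nat) : Int)) := by norm_num
  rw [h2, PySem.List.slice_natCast_add]

theorem aLoop_eq_specA (cs : List Char) (i : Nat) (acc : List Char) :
    aLoop cs i acc = acc ++ specA (cs.drop i) := by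
  have H : ∀ (n i : Nat) (acc : List Char), cs.length - i ≤ n →
      aLoop cs i acc = acc ++ specA (cs.drop i) := by
    intro n
    induction n with
    | zero =>
      intro i acc h
      have hge : ¬ i < cs.length := by omega
      have hd : List.drop i cs = [] := List.drop_eq_nil_of_le (by omega)
      rw [aLoop]
      simp only [hge, dif_neg, not_false_iff, hd]
      rw [show specA [] = [] from rfl]
      simp
    | succ n ih =>
      intro i acc h
      by_cases hi : i < cs.length
      · have hdrop : cs.drop i = cs[i] :: cs.drop (i + 1) := List.drop_eq_getElem_cons hi
        have hgi : cs[i]! = cs[i] := getElem!_pos cs i hi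
        rw [aLoop]
        simp only [hi, dif_pos]
        by_cases hp : i + 1 < cs.length ∧ cs[i]! ∈ aStandard ∧ cs[i+1]! ∈ aStandard
        · have h1 : i + 1 < cs.length := hp.1
          have hdrop1 : cs.drop (i + 1) = cs[i+1] :: cs.drop (i + 2) :=
            List.drop_eq_getElem_cons h1
          have hgi1 : cs[i+1]! = cs[i+1] := getElem!_pos cs (i+1) h1
          rw [if_pos hp, ih (i + 2) _ (by omega)]
          rw [slice_two, hdrop, hdrop1]
          simp only [List.take_succ_cons, List.take_zero]
          rw [specA]
          rw [if_pos ⟨hgi ▸ hp.2.1, hgi1 ▸ hp.2.2⟩]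
          simp
        · rw [if_neg hp]
          have hsingle : ∀ acc', aLoop cs (i + 1) acc' = acc' ++ specA (cs.drop (i + 1)) :=
            fun acc' => ih (i + 1) acc' (by omega)
          have hout : specA (cs.drop i) = aSingleOut cs[i] :: specA (cs.drop (i + 1)) := by
            rcases h1 : cs.drop (i + 1) with _ | ⟨b, rest⟩
            · rw [hdrop, h1]; rfl
            · rw [hdrop, h1, specA]
              have hlt : i + 1 < cs.length := by
                by_contra hc
                rw [List.drop_eq_nil_of_le (by omega)] at h1; simp at h1
              have hb : b = cs[i+1] := by
                rw [List.drop_eq_getElem_cons hlt] at h1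
                exact (List.cons.injEq _ _ _ _ ▸ h1).1.symm
              have : ¬ (cs[i] ∈ aStandard ∧ b ∈ aStandard) := by
                intro hcon
                exact hp ⟨hlt, by rw [hgi]; exact hcon.1,
                  by rw [getElem!_pos cs (i+1) hlt, ← hb]; exact hcon.2⟩
              rw [if_neg this]
          rw [hout]
          by_cases hc : aSingleMap.contains cs[i]!
          · simp only [hgi] at hc
            rw [hgi]; simp only [hc, if_pos]
            rw [hsingle]
            simp [aSingleOut, hc]
          · simp only [hgi] at hc
            rw [hgi]; simp only [hc]
            simp only [Bool.false_eq_true, if_false]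
            rw [hsingle]
            simp [aSingleOut, hc]
      · have hd : List.drop i cs = [] := List.drop_eq_nil_of_le (by omega)
        rw [aLoop]
        simp only [hi, dif_neg, not_false_iff, hd]
        rw [show specA [] = [] from rfl]
        simp
  exact H (cs.length - i) i acc (le_refl _)

-- B's fold with an explicit pending state, as structural recursion
def specB : Option Char → List Char → List Char
  | none, [] => []
  | some p, [] => [bSingle p]
  | p, c :: rest =>
    if c ∈ (['A', 'C', 'G', 'T'] : List Char) then
      match p with
      | none => specB (some c) rest
      | some x => bPair x c :: specB none rest
    else
      (match p with
       | some x => [bSingle x, bNon c]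
       | none => [bNon c]) ++ specB none rest

def bFinish (r : List Char × Option Char) : List Char :=
  match r.2 with
  | some p => r.1 ++ [bSingle p]
  | none => r.1

theorem foldl_bStep_eq_specB (cs : List Char) : ∀ (acc : List Char) (p : Option Char),
    bFinish (cs.foldl bStep (acc, p)) = acc ++ specB p cs := by
  induction cs with
  | nil =>
    intro acc p
    cases p <;> simp [bFinish, specB]
  | cons c rest ih =>
    intro acc p
    rw [List.foldl_cons]
    by_cases hc : c ∈ (['A', 'C', 'G', 'T'] : List Char)
    · cases p with
      | none =>
        rw [show bStep (acc, none) c = (acc, some c) by simp [bStep, hc]]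
        rw [ih, specB]
        simp [hc]
      | some x =>
        rw [show bStep (acc, some x) c = (acc ++ [bPair x c], none) by simp [bStep, hc]]
        rw [ih, specB]
        simp [hc]
    · cases p with
      | none =>
        rw [show bStep (acc, none) c = (acc ++ [bNon c], none) by simp [bStep, hc]]
        rw [ih, specB]
        simp [hc]
      | some x =>
        rw [show bStep (acc, some x) c = (acc ++ [bSingle x, bNon c], none) by simp [bStep, hc]]
        rw [ih, specB]
        simp [hc]

-- the three pointwise facts about A's concrete dicts vs B's arithmetic codes
theorem pair_agree : ∀ x ∈ aStandard, ∀ c ∈ aStandard, aPairMap.getD [x, c] ' ' = bPair x c := by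
  intro x hx c hc
  fin_cases hx <;> fin_cases hc <;> decide

theorem single_agree : ∀ x ∈ aStandard, aSingleOut x = bSingle x := by
  intro x hx; fin_cases hx <;> decide

theorem non_agree : ∀ c ∈ aNonStandard, aSingleOut c = bNon c := by
  intro c hc; fin_cases hc <;> decide

theorem std_sub (c : Char)
    (h : c ∈ (['A', 'C', 'G', 'T', 'H', 'I', 'M', 'O', 'P', 'Q'] : List Char)) :
    c ∈ aStandard ∨ c ∈ aNonStandard := by
  fin_cases h <;> simp [aStandard, aNonStandard]

theorem specB_eq_specA (cs : List Char)
    (h : ∀ c ∈ cs, c ∈ (['A', 'C', 'G', 'T', 'H', 'I', 'M', 'O', 'P', 'Q'] : List Char)) :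
    specB none cs = specA cs ∧
      ∀ x ∈ aStandard, specB (some x) cs = specA (x :: cs) := by
  induction cs with
  | nil =>
    refine ⟨rfl, fun x hx => ?_⟩
    rw [show specB (some x) [] = [bSingle x] from rfl,
      show specA [x] = [aSingleOut x] from rfl, single_agree x hx]
  | cons c rest ih =>
    have hc := h c (List.mem_cons_self ..)
    have hrest : ∀ c ∈ rest, c ∈ (['A','C','G','T','H','I','M','O','P','Q'] : List Char) :=
      fun a ha => h a (List.mem_cons_of_mem _ ha)
    obtain ⟨ih1, ih2⟩ := ih hrest
    have hstd : c ∈ aStandard ∨ c ∈ aNonStandard := std_sub c hc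
    constructor
    · rw [specB]
      by_cases hcs : c ∈ (['A', 'C', 'G', 'T'] : List Char)
      · rw [if_pos hcs]
        exact ih2 c hcs
      · rw [if_neg hcs]
        have hcn : c ∈ aNonStandard := by
          rcases hstd with h1 | h1
          · exact absurd h1 hcs
          · exact h1
        rcases rest with _ | ⟨b, rest2⟩
        · rw [show specA [c] = [aSingleOut c] from rfl, non_agree c hcn]; rfl
        · rw [specA, if_neg (fun hcon => hcs hcon.1), non_agree c hcn, ih1]; rfl
    · intro x hx
      rw [specB]
      by_cases hcs : c ∈ (['A', 'C', 'G', 'T'] : List Char)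
      · rw [if_pos hcs, specA, if_pos ⟨hx, hcs⟩, pair_agree x hx c hcs, ih1]
      · rw [if_neg hcs]
        have hcn : c ∈ aNonStandard := by
          rcases hstd with h1 | h1
          · exact absurd h1 hcs
          · exact h1
        rw [specA, if_neg (fun hcon => hcs hcon.2), single_agree x hx]
        have : specA (c :: rest) = aSingleOut c :: specA rest := by
          rcases rest with _ | ⟨b, rest2⟩
          · rfl
          · rw [specA, if_neg (fun hcon => hcs hcon.1)]
        rw [this, non_agree c hcn, ← ih1]
        rcases rest with _ | ⟨b, rest2⟩ <;> simp


-- ===== VERDICT (by name: the statement is the Claim_ definition above) =====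
theorem encrypt_bases_spec : Claim_equal_encrypt_bases := by
  intro s _ hpre
  unfold Spec_encrypt_bases encrypt_bases encrypt_bases_alt
  have h : ∀ c ∈ s.toList, c ∈ (['A','C','G','T','H','I','M','O','P','Q'] : List Char) := by
    have := hpre
    unfold Pre_encrypt_bases at this
    simpa [List.all_eq_true] using this
  rw [aLoop_eq_specA]
  simp only [List.drop_zero, List.nil_append]
  have hb : bFinish (s.toList.foldl bStep ([], none)) = specB none s.toList :=
    foldl_bStep_eq_specB s.toList [] none
  have hm : (match (List.foldl bStep ([], none) s.toList).2 with
      | some p => (List.foldl bStep ([], none) s.toList).1 ++ [bSingle p]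
      | none => (List.foldl bStep ([], none) s.toList).1)
      = bFinish (List.foldl bStep ([], none) s.toList) := rfl
  rw [hm, hb, (specB_eq_specA s.toList h).1]
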